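-- pv_equiv track=rewrite | github.com/eyadayman12/Question-Answer-Generation | CountKeyPhrases.py | count_keyPhrases_for_RakeAlgo
-- ===== SOURCE A (Python) =====
-- def count_keyPhrases_for_RakeAlgo(keyphrases, KP):
--     common_keyPhrases = KP
--
--     for counter, (score, candidate) in enumerate(keyphrases):
--         if counter == 20:
--             break
--         if common_keyPhrases.get(candidate) != None:
--             common_keyPhrases[candidate] = common_keyPhrases[candidate] = common_keyPhrases[candidate]+1
--         else:
--             common_keyPhrases[candidate] = 1
--
--     return common_keyPhrases
-- ===== SOURCE B (Python) =====
-- def count_keyPhrases_for_RakeAlgo(keyphrases, KP):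
--     # Two-pass shape: take the top-20 candidates, then for each DISTINCT candidate
--     # (in first-occurrence order) merge its total occurrence count into KP at once.
--     top = [candidate for _score, candidate in keyphrases[:20]]
--     for candidate in dict.fromkeys(top):
--         KP[candidate] = KP.get(candidate, 0) + top.count(candidate)
--     return KP
-- ===== Notes on version B (the rewrite author's own statement) =====
-- stated objective: simpler
-- what changed: Instead of A's enumerate-with-break loop that increments a dict entry once per occurrence with an explicit get()!=None branch, B slices the first 20 keyphrases, deduplicates the candidates in first-occurrence order and merges each distinct candidate's total count into KP in one assignment.
import Mathlib
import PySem

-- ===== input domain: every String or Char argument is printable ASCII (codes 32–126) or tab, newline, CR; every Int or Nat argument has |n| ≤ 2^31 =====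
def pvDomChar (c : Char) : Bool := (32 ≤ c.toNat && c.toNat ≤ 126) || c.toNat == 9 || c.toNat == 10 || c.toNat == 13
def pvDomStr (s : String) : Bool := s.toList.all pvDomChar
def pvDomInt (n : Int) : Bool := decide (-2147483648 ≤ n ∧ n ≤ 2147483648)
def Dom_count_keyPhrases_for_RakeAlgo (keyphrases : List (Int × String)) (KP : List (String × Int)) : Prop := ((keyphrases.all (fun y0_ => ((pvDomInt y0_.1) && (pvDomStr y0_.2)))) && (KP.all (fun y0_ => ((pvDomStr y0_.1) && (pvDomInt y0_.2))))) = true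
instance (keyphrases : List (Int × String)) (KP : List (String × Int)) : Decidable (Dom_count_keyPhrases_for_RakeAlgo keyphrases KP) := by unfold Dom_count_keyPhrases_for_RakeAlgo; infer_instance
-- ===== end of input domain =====

-- B replaces A's enumerate-with-break increment loop by slice-the-top-20, dedup, and
-- merge each distinct candidate's total count into KP in one assignment (objective:
-- simpler). Both Pythons mutate KP in place identically; the equivalence proved here
-- is about the returned dict.

-- ===== PORT A =====
-- 'for counter, (score, candidate) in enumerate(keyphrases): if counter == 20: break; …'
def pvALoopA : List (Int × (Int × String)) → PySem.Dict String Int → PySem.Dict String Int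
  | [], d => d
  | (counter, (_score, candidate)) :: rest, d =>
    if counter == 20 then d
    else
      match d.get? candidate with
      | some v => pvALoopA rest (d.insert candidate (v + 1))
      | none   => pvALoopA rest (d.insert candidate 1)

def count_keyPhrases_for_RakeAlgo (keyphrases : List (Int × String)) (KP : List (String × Int)) : List (String × Int) :=
  let common_keyPhrases := PySem.Dict.ofList KP
  (pvALoopA (PySem.List.enumerate keyphrases) common_keyPhrases).items

-- ===== PORT B =====
def count_keyPhrases_for_RakeAlgo_alt (keyphrases : List (Int × String)) (KP : List (String × Int)) : List (String × Int) :=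
  let top := (PySem.List.slice keyphrases none (some 20)).map (·.2)
  let kp := (PySem.List.dedup top).foldl
      (fun d candidate => d.insert candidate (d.getD candidate 0 + (top.count candidate : Int)))
      (PySem.Dict.ofList KP)
  kp.items

-- ===== PRECONDITION & SPEC =====
def Spec_count_keyPhrases_for_RakeAlgo (keyphrases : List (Int × String)) (KP : List (String × Int)) (out : List (String × Int)) : Prop := out = count_keyPhrases_for_RakeAlgo_alt keyphrases KP
instance (keyphrases : List (Int × String)) (KP : List (String × Int)) (out : List (String × Int)) : Decidable (Spec_count_keyPhrases_for_RakeAlgo keyphrases KP out) := by unfold Spec_count_keyPhrases_for_RakeAlgo; infer_instance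

-- ===== CLAIM (what is proved, stated in full; the proofs are below) =====
def Claim_equal_count_keyPhrases_for_RakeAlgo : Prop := ∀ (keyphrases : List (Int × String)) (KP : List (String × Int)), Dom_count_keyPhrases_for_RakeAlgo keyphrases KP → Spec_count_keyPhrases_for_RakeAlgo keyphrases KP (count_keyPhrases_for_RakeAlgo keyphrases KP)

-- ===== LEMMAS AND PROOFS =====

-- A's loop (started at counter = n ≤ 20) is the increment-fold over the candidates of
-- the first 20 - n remaining keyphrases.
theorem pvALoopA_eq_fold (kps : List (Int × String)) :
    ∀ (n : Nat) (d : PySem.Dict String Int), n ≤ 20 →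
    pvALoopA (PySem.List.enumerate kps (n : Int)) d
      = ((kps.take (20 - n)).map (·.2)).foldl
          (fun d c => d.insert c (d.getD c 0 + 1)) d := by
  induction kps with
  | nil => intro n d _; simp [PySem.List.enumerate, pvALoopA]
  | cons p rest ih =>
    intro n d hn
    obtain ⟨s, c⟩ := p
    rw [PySem.List.enumerate_cons]
    by_cases h20 : n = 20
    · subst h20
      simp [pvALoopA]
    · have hlt : n < 20 := lt_of_le_of_ne hn h20
      have hne : ((n : Int) == 20) = false := by
        simp; omega
      have hsub : 20 - n = (20 - (n + 1)) + 1 := by omega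
      have hstep : pvALoopA ((↑n, (s, c)) :: PySem.List.enumerate rest (↑n + 1)) d
          = pvALoopA (PySem.List.enumerate rest (↑n + 1)) (d.insert c (d.getD c 0 + 1)) := by
        cases hget : d.get? c with
        | some v =>
          rw [PySem.Dict.getD_of_get?_eq_some d 0 hget]
          simp [pvALoopA, hne, hget]
        | none =>
          rw [PySem.Dict.getD_of_get?_eq_none d 0 hget]
          simp [pvALoopA, hne, hget]
      have hcast : ((n : Int) + 1) = (((n + 1 : Nat)) : Int) := by push_cast; ring
      rw [hstep, hcast, ih (n + 1) _ (by omega), hsub]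
      simp [List.take_succ_cons]

-- getD after B's merge fold over a duplicate-free key list.
theorem getD_merge_fold (ks : List String) (f : String → Int) :
    ∀ (d : PySem.Dict String Int), ks.Nodup → ∀ (v : String),
    (ks.foldl (fun d k => d.insert k (d.getD k 0 + f k)) d).getD v 0
      = if v ∈ ks then d.getD v 0 + f v else d.getD v 0 := by
  induction ks with
  | nil => intro d _ v; simp
  | cons k rest ih =>
    intro d hnd v
    have hk : k ∉ rest := (List.nodup_cons.mp hnd).1
    have hrest : rest.Nodup := (List.nodup_cons.mp hnd).2
    simp only [List.foldl_cons]
    rw [ih _ hrest v]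
    by_cases hvr : v ∈ rest
    · have hvk : v ≠ k := fun h => hk (h ▸ hvr)
      simp [hvr, hvk, PySem.Dict.getD_insert]
    · by_cases hvk : v = k
      · subst hvk
        simp [hvr]
      · simp [hvr, hvk, PySem.Dict.getD_insert]

-- ===== VERDICT (by name: the statement is the Claim_ definition above) =====
theorem count_keyPhrases_for_RakeAlgo_spec : Claim_equal_count_keyPhrases_for_RakeAlgo := by
  intro keyphrases KP _hdom
  unfold Spec_count_keyPhrases_for_RakeAlgo
  simp only [count_keyPhrases_for_RakeAlgo, count_keyPhrases_for_RakeAlgo_alt]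
  have hslice : PySem.List.slice keyphrases none (some 20) = keyphrases.take 20 := by
    rw [PySem.List.slice_to keyphrases (b := 20) (by omega)]
    rfl
  rw [hslice, List.map_take]
  set cs : List String := (keyphrases.map (·.2)).take 20 with hcs
  set d0 : PySem.Dict String Int := PySem.Dict.ofList KP with hd0
  have hA : pvALoopA (PySem.List.enumerate keyphrases) d0
      = cs.foldl (fun d c => d.insert c (d.getD c 0 + 1)) d0 := by
    have h := pvALoopA_eq_fold keyphrases 0 d0 (by omega)
    simpa using h
  rw [hA]
  set dA := cs.foldl (fun d c => d.insert c (d.getD c 0 + 1)) d0 with hdA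
  set dB := (PySem.List.dedup cs).foldl
      (fun d c => d.insert c (d.getD c 0 + (cs.count c : Int))) d0 with hdB
  have hdedup : PySem.List.dedup cs = PySem.Set.ofList cs := rfl
  have hnd0 : d0.keys.Nodup := PySem.Dict.nodup_keys_ofList KP
  have hndA : dA.keys.Nodup := PySem.Dict.nodup_keys_foldl_insert cs _ d0 hnd0
  have hndB : dB.keys.Nodup := PySem.Dict.nodup_keys_foldl_insert _ _ d0 hnd0
  have hkeys : dA.keys = dB.keys := by
    rw [hdA, hdB, PySem.Dict.keys_foldl_insert, PySem.Dict.keys_foldl_insert, hdedup,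
        PySem.Set.update_eq_append_filter, PySem.Set.update_eq_append_filter,
        PySem.Set.ofList_ofList]
  have hgetD : ∀ v, dA.getD v 0 = dB.getD v 0 := by
    intro v
    rw [hdA, hdB, PySem.Dict.getD_foldl_insert_add_one, hdedup,
        getD_merge_fold (PySem.Set.ofList cs) (fun c => (cs.count c : Int)) d0
          (PySem.Set.nodup_ofList cs) v]
    by_cases hv : v ∈ cs
    · simp [PySem.Set.mem_ofList, hv]
    · have : cs.count v = 0 := List.count_eq_zero.mpr hv
      simp [PySem.Set.mem_ofList, hv, this]
  rw [PySem.Dict.items_eq_map_keys dA hndA 0, PySem.Dict.items_eq_map_keys dB hndB 0, hkeys]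
  exact List.map_congr_left (fun k _ => by rw [hgetD k])
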